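-- pv_equiv track=rewrite | github.com/Derfador1/treatment | tcp_server.py | is_undulant
-- ===== SOURCE A (Python) =====
-- def is_undulant(n):
-- 	if n == 0:
-- 		return False
-- 	digits = [int(i) for i in list(str(n))]
-- 	diffs = []
-- 	for i in range(len(digits) - 1):
-- 		diffs.append((digits[i] > digits[i+1]) - (digits[i] < digits[i+1]))
-- 	if len(diffs) == 1:
-- 	   if diffs[0] == 0:
-- 		   return False
-- 	else:
-- 	   for i in range(len(diffs) - 1):
-- 		   if diffs[i] * diffs[i+1] != -1:
-- 		       return False
-- 	return True
-- ===== SOURCE B (Python) =====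
-- def is_undulant(n):
--     if n == 0:
--         return False
--     s = str(n)
--     prev_sign = None
--     for a_ch, b_ch in zip(s, s[1:]):
--         a, b = int(a_ch), int(b_ch)
--         sign = (a > b) - (a < b)
--         if sign == 0:
--             return False
--         if prev_sign is not None and sign == prev_sign:
--             return False
--         prev_sign = sign
--     return True
-- ===== Notes on version B (the rewrite author's own statement) =====
-- stated objective: simpler
-- what changed: B replaces A's two passes (build the diffs list, then a separate special case for a single diff plus an adjacent-product check) with one fused scan over adjacent digit pairs that tracks only the previous direction.
import Mathlib
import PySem

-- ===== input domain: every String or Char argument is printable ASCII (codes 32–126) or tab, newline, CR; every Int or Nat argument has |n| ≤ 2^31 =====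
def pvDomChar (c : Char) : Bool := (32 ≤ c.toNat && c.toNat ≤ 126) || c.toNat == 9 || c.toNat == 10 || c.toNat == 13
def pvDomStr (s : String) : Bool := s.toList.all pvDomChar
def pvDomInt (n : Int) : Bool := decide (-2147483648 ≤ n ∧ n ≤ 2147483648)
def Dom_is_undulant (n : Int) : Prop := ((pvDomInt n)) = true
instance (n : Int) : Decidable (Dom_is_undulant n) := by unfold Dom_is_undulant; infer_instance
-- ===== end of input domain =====

-- B fuses A's two passes (build `diffs`, then check products) into one scan over
-- adjacent digit pairs tracking only the previous direction (objective: simpler).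

-- ===== PORT A =====
-- int(i) for a one-character string i; `none` (Python ValueError, e.g. on '-') only occurs outside Pre_
def pvDigit (c : Char) : Int := (PySem.Int.ofStr? (String.ofList [c])).getD 0

def is_undulant (n : Int) : Bool :=
  if n == 0 then false
  else
    let digits := (PySem.Int.toStr n).toList.map pvDigit
    let diffs := (List.range (digits.length - 1)).map (fun i =>
      (if digits.getD i 0 > digits.getD (i + 1) 0 then (1 : Int) else 0) -
      (if digits.getD i 0 < digits.getD (i + 1) 0 then (1 : Int) else 0))
    if diffs.length == 1 then
      if diffs.getD 0 0 == 0 then false else true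
    else
      (List.range (diffs.length - 1)).all (fun i =>
        diffs.getD i 0 * diffs.getD (i + 1) 0 == -1)

-- ===== PORT B =====
def pvAltLoop (prev : Option Int) : List Char → Bool
  | [] => true
  | [_] => true
  | a :: b :: rest =>
    let x := pvDigit a
    let y := pvDigit b
    let sign := (if x > y then (1 : Int) else 0) - (if x < y then (1 : Int) else 0)
    if sign == 0 then false
    else if prev.any (· == sign) then false
    else pvAltLoop (some sign) (b :: rest)

def is_undulant_alt (n : Int) : Bool :=
  if n == 0 then false
  else pvAltLoop none (PySem.Int.toStr n).toList

-- ===== PRECONDITION & SPEC =====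
-- Pre_ excludes exactly n < 0, where both Pythons raise ValueError (int('-') on the sign character).
def Pre_is_undulant (n : Int) : Prop := 0 ≤ n
instance (n : Int) : Decidable (Pre_is_undulant n) := by unfold Pre_is_undulant; infer_instance
def pvWitness_is_undulant : Int := (69420)

def Spec_is_undulant (n : Int) (out : Bool) : Prop := out = is_undulant_alt n
instance (n : Int) (out : Bool) : Decidable (Spec_is_undulant n out) := by unfold Spec_is_undulant; infer_instance

-- ===== CLAIM (what is proved, stated in full; the proofs are below) =====
def Claim_equal_is_undulant : Prop := ∀ (n : Int), Dom_is_undulant n → Pre_is_undulant n → Spec_is_undulant n (is_undulant n)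

-- ===== LEMMAS AND PROOFS =====

-- the sign (a > b) - (a < b)
def pvSgn (a b : Int) : Int := (if a > b then (1 : Int) else 0) - (if a < b then (1 : Int) else 0)

-- recursive form of A's diffs list
def pvPairSigns : List Int → List Int
  | [] => []
  | [_] => []
  | a :: b :: t => pvSgn a b :: pvPairSigns (b :: t)

-- recursive form of A's product check
def pvOkProd : List Int → Bool
  | [] => true
  | [_] => true
  | a :: b :: t => (a * b == -1) && pvOkProd (b :: t)

-- B's scan expressed on the sign list
def pvBLoop (prev : Option Int) : List Int → Bool
  | [] => true
  | s :: t =>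
    if s == 0 then false
    else if prev.any (· == s) then false
    else pvBLoop (some s) t

lemma pvPairSigns_mem : ∀ (l : List Int), ∀ s ∈ pvPairSigns l, s = -1 ∨ s = 0 ∨ s = 1 := by
  intro l
  induction l with
  | nil => simp [pvPairSigns]
  | cons a t ih =>
    cases t with
    | nil => simp [pvPairSigns]
    | cons b t' =>
      intro s hs
      simp only [pvPairSigns, List.mem_cons] at hs
      rcases hs with h | h
      · subst h; unfold pvSgn; split_ifs <;> omega
      · exact ih s h

lemma pvDiffs_eq (l : List Int) :
    (List.range (l.length - 1)).map (fun i =>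
      (if l.getD i 0 > l.getD (i + 1) 0 then (1 : Int) else 0) -
      (if l.getD i 0 < l.getD (i + 1) 0 then (1 : Int) else 0)) = pvPairSigns l := by
  induction l with
  | nil => simp [pvPairSigns]
  | cons a t ih =>
    cases t with
    | nil => simp [pvPairSigns]
    | cons b t' =>
      simp only [pvPairSigns, List.length_cons]
      rw [show t'.length + 1 + 1 - 1 = t'.length + 1 by omega]
      rw [List.range_succ_eq_map, List.map_cons, List.map_map]
      simp only [List.getD_cons_zero, List.getD_cons_succ]
      exact congrArg _ ih

lemma pvAll_eq (l : List Int) :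
    (List.range (l.length - 1)).all (fun i => l.getD i 0 * l.getD (i + 1) 0 == -1)
      = pvOkProd l := by
  induction l with
  | nil => simp [pvOkProd]
  | cons a t ih =>
    cases t with
    | nil => simp [pvOkProd]
    | cons b t' =>
      simp only [pvOkProd, List.length_cons]
      rw [show t'.length + 1 + 1 - 1 = t'.length + 1 by omega]
      rw [List.range_succ_eq_map, List.all_cons, List.all_map]
      simp only [List.getD_cons_zero, List.getD_cons_succ]
      exact congrArg _ ih

lemma pvAltLoop_eq : ∀ (l : List Char) (prev : Option Int),
    pvAltLoop prev l = pvBLoop prev (pvPairSigns (l.map pvDigit)) := by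
  intro l
  induction l with
  | nil => intro prev; simp [pvAltLoop, pvPairSigns, pvBLoop]
  | cons a t ih =>
    cases t with
    | nil => intro prev; simp [pvAltLoop, pvPairSigns, pvBLoop]
    | cons b t' =>
      intro prev
      simp only [List.map_cons] at ih ⊢
      simp only [pvAltLoop, pvPairSigns, pvBLoop, pvSgn]
      split_ifs <;> first | rfl | exact ih _

lemma pvBLoop_some_eq : ∀ (ss : List Int) (p : Int), (p = -1 ∨ p = 1) →
    (∀ s ∈ ss, s = -1 ∨ s = 0 ∨ s = 1) →
    pvBLoop (some p) ss = pvOkProd (p :: ss) := by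
  intro ss
  induction ss with
  | nil => intro p _ _; simp [pvBLoop, pvOkProd]
  | cons s t ih =>
    intro p hp hmem
    have hs : s = -1 ∨ s = 0 ∨ s = 1 := hmem s (List.mem_cons_self ..)
    simp only [pvBLoop, pvOkProd, Option.any_some]
    split_ifs with h1 h2
    · -- s = 0
      have : s = 0 := by simpa using h1
      subst this
      simp
    · -- s = p
      have : p = s := by simpa using h2
      subst this
      have : ¬ (p * p = -1) := by rcases hp with h | h <;> subst h <;> decide
      simp [this]
    · have hs0 : ¬ s = 0 := by simpa using h1
      have hps : ¬ p = s := by simpa using h2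
      have hprod : p * s = -1 := by
        rcases hp with h | h <;> rcases hs with h' | h' | h' <;> subst h <;> subst h' <;> simp_all
      rw [ih s (by rcases hs with h | h | h <;> simp_all) (fun x hx => hmem x (List.mem_cons_of_mem _ hx))]
      simp [hprod]

lemma pvMain (ds : List Int) :
    (if (pvPairSigns ds).length == 1 then
       (if (pvPairSigns ds).getD 0 0 == 0 then false else true)
     else pvOkProd (pvPairSigns ds)) = pvBLoop none (pvPairSigns ds) := by
  have hmem := pvPairSigns_mem ds
  generalize h : pvPairSigns ds = ss at hmem ⊢
  cases ss with
  | nil => simp [pvOkProd, pvBLoop]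
  | cons s1 rest =>
    cases rest with
    | nil =>
      simp only [pvBLoop, List.length_cons, List.length_nil, List.getD_cons_zero]
      by_cases h0 : s1 = 0 <;> simp [h0]
    | cons s2 t =>
      rw [if_neg (by simp : ¬ (((s1 :: s2 :: t).length == 1) = true))]
      by_cases h0 : s1 = 0
      · subst h0
        simp [pvBLoop, pvOkProd]
      · have hs1 : s1 = -1 ∨ s1 = 1 := by
          rcases hmem s1 (List.mem_cons_self ..) with h | h | h <;> simp_all
        rw [show pvBLoop none (s1 :: s2 :: t) = pvBLoop (some s1) (s2 :: t) by
          simp [pvBLoop, h0]]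
        rw [pvBLoop_some_eq (s2 :: t) s1 hs1
          (fun x hx => hmem x (List.mem_cons_of_mem _ hx))]

-- ===== VERDICT (by name: the statement is the Claim_ definition above) =====
theorem is_undulant_spec : Claim_equal_is_undulant := by
  intro n _ _
  unfold Spec_is_undulant
  show is_undulant n = is_undulant_alt n
  unfold is_undulant is_undulant_alt
  by_cases h0 : (n == 0) = true
  · rw [if_pos h0, if_pos h0]
  · rw [if_neg h0, if_neg h0]
    simp only [pvDiffs_eq]
    rw [pvAll_eq, pvMain, pvAltLoop_eq]
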